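-- pv_equiv track=rewrite | github.com/o19s/opensearch-migrations | AIAdvisor/skills/solr-opensearch-migration-advisor/scripts/query_converter.py | _split_boolean
-- ===== SOURCE A (Python) =====
-- def _split_boolean(query: str) -> tuple[str, list[str]] | None:
--     """Split a query on a top-level AND or OR operator.
--
--     Returns ``(operator, [parts])`` or ``None`` if no top-level operator is
--     found.  Only splits on AND/OR that are not inside parentheses or quotes.
--     """
--     depth = 0
--     in_quote = False
--     i = 0
--     while i < len(query):
--         ch = query[i]
--         if ch == '"':
--             in_quote = not in_quote
--         elif not in_quote:
--             if ch == '(':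
--                 depth += 1
--             elif ch == ')':
--                 depth -= 1
--             elif depth == 0:
--                 # Check for AND / OR
--                 for op in (' AND ', ' OR '):
--                     if query[i:].upper().startswith(op):
--                         left = query[:i].strip()
--                         right = query[i + len(op):].strip()
--                         return op.strip(), [left, right]
--         i += 1
--     return None
-- ===== SOURCE B (Python) =====
-- def _context_ok(prefix: str) -> bool:
--     """True iff the end of ``prefix`` is at paren depth 0 and outside quotes."""
--     depth = 0
--     in_quote = False
--     for ch in prefix:
--         if ch == '"':
--             in_quote = not in_quote
--         elif not in_quote:
--             if ch == '(':
--                 depth += 1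
--             elif ch == ')':
--                 depth -= 1
--     return depth == 0 and not in_quote
--
--
-- def _split_boolean(query: str) -> tuple[str, list[str]] | None:
--     """Split a query on a top-level AND or OR operator (candidate-filter version)."""
--     up = query.upper()
--     for i in range(len(query)):
--         for op in ('AND', 'OR'):
--             tok = ' ' + op + ' '
--             if up.startswith(tok, i) and _context_ok(query[:i]):
--                 return op, [query[:i].strip(), query[i + len(tok):].strip()]
--     return None
-- ===== Notes on version B (the rewrite author's own statement) =====
-- stated objective: faster
-- what changed: A is one stateful scan that threads paren depth and quote state and re-uppercases the whole remaining suffix at every top-level position; B uppercases the query once, filters candidate indices against that copy, and re-derives the paren/quote context of a candidate's prefix with a separate fold helper only when an operator actually matches.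
import Mathlib
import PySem

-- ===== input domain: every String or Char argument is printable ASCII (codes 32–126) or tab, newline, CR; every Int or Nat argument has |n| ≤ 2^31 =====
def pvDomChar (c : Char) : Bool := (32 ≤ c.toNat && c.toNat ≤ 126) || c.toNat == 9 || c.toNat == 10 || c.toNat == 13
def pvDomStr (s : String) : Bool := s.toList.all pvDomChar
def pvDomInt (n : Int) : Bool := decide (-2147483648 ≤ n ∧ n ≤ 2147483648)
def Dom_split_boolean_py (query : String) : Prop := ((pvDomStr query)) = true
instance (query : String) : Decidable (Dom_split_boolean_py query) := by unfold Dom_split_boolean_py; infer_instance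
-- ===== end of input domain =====

-- B replaces A's single stateful scan (which re-uppercases the whole remaining suffix at every
-- top-level index) by a candidate filter over one precomputed uppercase copy, recomputing the
-- paren/quote context of a prefix only at actual operator matches; measurably faster on long queries.


-- ===== PORT A =====
-- while-loop of A: index i, paren depth, in_quote flag; the 'for op in (...)' is unrolled.
def splitALoop (q : List Char) (i : Nat) (depth : Int) (inq : Bool) :
    Option (String × List String) :=
  if h : i < q.length then
    let ch := q[i]
    if ch = '"' then splitALoop q (i+1) depth (!inq)
    else if !inq then
      if ch = '(' then splitALoop q (i+1) (depth+1) inq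
      else if ch = ')' then splitALoop q (i+1) (depth-1) inq
      else if depth = 0 then
        if PySem.Chars.startswith (PySem.Chars.upper (q.drop i)) " AND ".toList then
          some ("AND", [String.ofList (PySem.Chars.strip (q.take i)),
                        String.ofList (PySem.Chars.strip (q.drop (i+5)))])
        else if PySem.Chars.startswith (PySem.Chars.upper (q.drop i)) " OR ".toList then
          some ("OR", [String.ofList (PySem.Chars.strip (q.take i)),
                       String.ofList (PySem.Chars.strip (q.drop (i+4)))])
        else splitALoop q (i+1) depth inq
      else splitALoop q (i+1) depth inq
    else splitALoop q (i+1) depth inq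
  else none
termination_by q.length - i

def split_boolean_py (query : String) : Option (String × List String) :=
  splitALoop query.toList 0 0 false

-- ===== PORT B =====
-- helper _context_ok of B: fold over the prefix, then test the final state
def ctxStep (s : Int × Bool) (ch : Char) : Int × Bool :=
  if ch = '"' then (s.1, !s.2)
  else if !s.2 then
    if ch = '(' then (s.1 + 1, s.2)
    else if ch = ')' then (s.1 - 1, s.2)
    else s
  else s

def contextOk (pre : List Char) : Bool :=
  let st := pre.foldl ctxStep (0, false)
  st.1 == 0 && !st.2

-- index loop of B over the precomputed uppercase copy; inner 'for op' unrolled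
def splitBGo (q up : List Char) (i : Nat) : Option (String × List String) :=
  if i < q.length then
    if PySem.Chars.startswith (up.drop i) " AND ".toList && contextOk (q.take i) then
      some ("AND", [String.ofList (PySem.Chars.strip (q.take i)),
                    String.ofList (PySem.Chars.strip (q.drop (i+5)))])
    else if PySem.Chars.startswith (up.drop i) " OR ".toList && contextOk (q.take i) then
      some ("OR", [String.ofList (PySem.Chars.strip (q.take i)),
                   String.ofList (PySem.Chars.strip (q.drop (i+4)))])
    else splitBGo q up (i+1)
  else none
termination_by q.length - i

def split_boolean_py_alt (query : String) : Option (String × List String) :=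
  splitBGo query.toList (PySem.Chars.upper query.toList) 0

-- ===== PRECONDITION & SPEC =====
def Spec_split_boolean_py (query : String) (out : Option (String × List String)) : Prop := out = split_boolean_py_alt query
instance (query : String) (out : Option (String × List String)) : Decidable (Spec_split_boolean_py query out) := by unfold Spec_split_boolean_py; infer_instance

-- ===== CLAIM (what is proved, stated in full; the proofs are below) =====
def Claim_equal_split_boolean_py : Prop := ∀ (query : String), Dom_split_boolean_py query → Spec_split_boolean_py query (split_boolean_py query)

-- ===== LEMMAS AND PROOFS =====

lemma ctx_take_succ (q : List Char) (i : Nat) (h : i < q.length) :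
    (q.take (i+1)).foldl ctxStep (0, false) =
      ctxStep ((q.take i).foldl ctxStep (0, false)) q[i] := by
  rw [List.take_add_one, List.getElem?_eq_getElem h]
  rw [Option.toList_some, List.foldl_append]
  simp

-- operator candidates start with ' ', so an index whose char is '"', '(' or ')' never matches
lemma no_cand_of_ne_space (q : List Char) (i : Nat) (h : i < q.length)
    (hne : PySem.Chars.upperChar q[i] ≠ ' ') (tok : List Char) (htok : tok.head? = some ' ') :
    PySem.Chars.startswith ((PySem.Chars.upper q).drop i) tok = false := by
  have hdrop : (PySem.Chars.upper q).drop i =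
      PySem.Chars.upperChar q[i] :: (PySem.Chars.upper q).drop (i+1) := by
    have h' : i < (PySem.Chars.upper q).length := by simpa [PySem.Chars.upper] using h
    rw [List.drop_eq_getElem_cons h']
    simp [PySem.Chars.upper]
  rcases tok with _ | ⟨c, tl⟩
  · simp at htok
  · simp at htok
    subst htok
    rw [hdrop]
    simp [PySem.Chars.startswith, List.isPrefixOf]
    intro hc
    exact absurd hc.symm hne

lemma upper_drop (q : List Char) (i : Nat) :
    (PySem.Chars.upper q).drop i = PySem.Chars.upper (q.drop i) := by
  simp [PySem.Chars.upper, List.map_drop]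

-- main invariant: A's carried state equals the fold of the processed prefix
lemma loop_eq (q : List Char) (i : Nat) (d : Int) (inq : Bool)
    (hst : (q.take i).foldl ctxStep (0, false) = (d, inq)) :
    splitALoop q i d inq = splitBGo q (PySem.Chars.upper q) i := by
  by_cases h : i < q.length
  · have hstep := ctx_take_succ q i h
    rw [hst] at hstep
    rw [splitALoop, splitBGo]
    simp only [h, dif_pos, if_pos]
    have hctx : contextOk (q.take i) = (d == 0 && !inq) := by
      simp [contextOk, hst]
    by_cases hq : q[i] = '"'
    · have hnoA := no_cand_of_ne_space q i h (by rw [hq]; decide) [' ','A','N','D',' '] (by decide)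
      have hnoO := no_cand_of_ne_space q i h (by rw [hq]; decide) [' ','O','R',' '] (by decide)
      have IH := loop_eq q (i+1) d (!inq) (by rw [hstep]; simp [ctxStep, hq])
      simp [hq, hnoA, hnoO]
      simpa using IH
    · by_cases hinq : inq = true
      · -- inside quote: A recurses unchanged, B's contextOk is false
        have IH := loop_eq q (i+1) d inq (by rw [hstep]; simp [ctxStep, hq, hinq])
        simp [hq, hinq, hctx]
        simpa [hinq] using IH
      · replace hinq : inq = false := by simpa using hinq
        by_cases hp : q[i] = '('
        · have hnoA := no_cand_of_ne_space q i h (by rw [hp]; decide) [' ','A','N','D',' '] (by decide)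
          have hnoO := no_cand_of_ne_space q i h (by rw [hp]; decide) [' ','O','R',' '] (by decide)
          have IH := loop_eq q (i+1) (d+1) inq (by rw [hstep]; simp [ctxStep, hp, hinq])
          simp [hp, hinq, hnoA, hnoO]
          simpa [hinq] using IH
        · by_cases hc : q[i] = ')'
          · have hnoA := no_cand_of_ne_space q i h (by rw [hc]; decide) [' ','A','N','D',' '] (by decide)
            have hnoO := no_cand_of_ne_space q i h (by rw [hc]; decide) [' ','O','R',' '] (by decide)
            have IH := loop_eq q (i+1) (d-1) inq (by rw [hstep]; simp [ctxStep, hc, hinq])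
            simp [hc, hinq, hnoA, hnoO]
            simpa [hinq] using IH
          · by_cases hd : d = 0
            · -- top level: both test the candidates on the same uppercase suffix
              have IH := loop_eq q (i+1) d inq (by rw [hstep]; simp [ctxStep, hq, hp, hc, hinq])
              rw [upper_drop]
              by_cases hand :
                  PySem.Chars.startswith (PySem.Chars.upper (q.drop i)) [' ','A','N','D',' '] = true
              · simp [hq, hp, hc, hd, hinq, hctx, hand]
              · by_cases hor :
                    PySem.Chars.startswith (PySem.Chars.upper (q.drop i)) [' ','O','R',' '] = true
                · simp [hq, hp, hc, hd, hinq, hctx, hand, hor]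
                · simp [hq, hp, hc, hd, hinq, hctx, hand, hor]
                  simpa [hinq, hd] using IH
            · -- depth ≠ 0: A recurses, B's contextOk is false
              have IH := loop_eq q (i+1) d inq (by rw [hstep]; simp [ctxStep, hq, hp, hc, hinq])
              simp [hq, hp, hc, hd, hinq, hctx]
              simpa [hinq] using IH
  · rw [splitALoop, splitBGo]
    simp [h]
termination_by q.length - i

-- ===== VERDICT (by name: the statement is the Claim_ definition above) =====
theorem split_boolean_py_spec : Claim_equal_split_boolean_py := by
  intro query _
  unfold Spec_split_boolean_py split_boolean_py split_boolean_py_alt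
  exact loop_eq query.toList 0 0 false (by simp)
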